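-- pv_equiv track=rewrite | github.com/kshhhhh91/coding-test-practice | 프로그래머스/lv1/42840. 모의고사/모의고사.py | solution
-- ===== SOURCE A (Python) =====
-- def solution(answers):
--   answer= []
--   ans1 = [1, 2, 3, 4, 5] * 2000
--   ans2 = [2, 1, 2, 3, 2, 4, 2, 5] * 1250
--   ans3 = [3, 3, 1, 1, 2, 2, 4, 4, 5, 5] * 1000
--
--   cor1 = []
--   cor2 = []
--   cor3 = []
--
--   for i in range(len(answers)):
--     if answers[i] == ans1[i]:
--       cor1.append(ans1[i])
--     if answers[i] == ans2[i]:
--       cor2.append(ans2[i])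
--     if answers[i] == ans3[i]:
--       cor3.append(ans3[i])
--
--   if len(cor1)>=len(cor2) and len(cor1)>=len(cor3):
--     answer.append(1)
--   if len(cor2)>=len(cor1) and len(cor2)>=len(cor3):
--     answer.append(2)
--   if len(cor3)>=len(cor1) and len(cor3)>=len(cor2):
--     answer.append(3)
--
--
--   return answer
-- ===== SOURCE B (Python) =====
-- def solution(answers):
--     # residue-value histogram: hist[(i % 40, a)] = how many positions i (mod 40 = r) hold answer a
--     hist = {}
--     for i, a in enumerate(answers):
--         k = (i % 40, a)
--         hist[k] = hist.get(k, 0) + 1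
--     # 40 = lcm(5, 8, 10): each pattern is constant on residues mod 40,
--     # so its score is a sum of 40 histogram lookups, independent of len(answers)
--     best = []
--     m = -1
--     for num, pat in ((1, [1, 2, 3, 4, 5]),
--                      (2, [2, 1, 2, 3, 2, 4, 2, 5]),
--                      (3, [3, 3, 1, 1, 2, 2, 4, 4, 5, 5])):
--         s = sum(hist.get((r, pat[r % len(pat)]), 0) for r in range(40))
--         if s > m:
--             best, m = [num], s
--         elif s == m:
--             best.append(num)
--     return best
-- ===== Notes on version B (the rewrite author's own statement) =====
-- stated objective: alternative
-- what changed: Replaces A's position-by-position comparison against three precomputed 10000-entry answer lists by one residue-mod-40 histogram of the input (40 = lcm of the pattern periods), scoring each pattern with 40 dictionary lookups, and a running-max selection loop instead of A's pairwise >= cascade.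
import Mathlib
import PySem

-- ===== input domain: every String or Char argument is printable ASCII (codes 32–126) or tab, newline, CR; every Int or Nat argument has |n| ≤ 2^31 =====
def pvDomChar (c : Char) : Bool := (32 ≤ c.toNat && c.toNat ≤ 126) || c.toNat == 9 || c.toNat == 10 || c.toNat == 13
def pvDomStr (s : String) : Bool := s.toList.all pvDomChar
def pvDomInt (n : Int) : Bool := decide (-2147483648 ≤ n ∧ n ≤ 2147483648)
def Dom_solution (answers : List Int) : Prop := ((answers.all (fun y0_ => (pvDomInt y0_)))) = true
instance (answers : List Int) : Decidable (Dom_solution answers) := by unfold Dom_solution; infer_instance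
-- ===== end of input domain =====

-- B replaces A's position-by-position comparison against three precomputed 10000-entry
-- answer lists by a residue-mod-40 histogram of the input (40 = lcm of the pattern periods)
-- scored with 40 dictionary lookups per pattern, and a running-max selection loop (objective: alternative).
-- A raises IndexError for more than 10000 answers (its precomputed lists end there); Pre_ excludes that.

-- ===== PORT A =====
def pvAns1 : List Int := (List.replicate 2000 ([1, 2, 3, 4, 5] : List Int)).flatten
def pvAns2 : List Int := (List.replicate 1250 ([2, 1, 2, 3, 2, 4, 2, 5] : List Int)).flatten
def pvAns3 : List Int := (List.replicate 1000 ([3, 3, 1, 1, 2, 2, 4, 4, 5, 5] : List Int)).flatten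

def solution (answers : List Int) : List Int :=
  -- for i in range(len(answers)): the three 'if … : corK.append(ansK[i])' lines, state (cor1, cor2, cor3)
  let cs := (PySem.List.pyRange 0 (PySem.List.len answers) 1).foldl
    (fun (c : List Int × List Int × List Int) i =>
      (if PySem.List.pyGetD answers i 0 = PySem.List.pyGetD pvAns1 i 0 then c.1 ++ [PySem.List.pyGetD pvAns1 i 0] else c.1,
       if PySem.List.pyGetD answers i 0 = PySem.List.pyGetD pvAns2 i 0 then c.2.1 ++ [PySem.List.pyGetD pvAns2 i 0] else c.2.1,
       if PySem.List.pyGetD answers i 0 = PySem.List.pyGetD pvAns3 i 0 then c.2.2 ++ [PySem.List.pyGetD pvAns3 i 0] else c.2.2)) ([], [], [])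
  let l1 : Int := cs.1.length
  let l2 : Int := cs.2.1.length
  let l3 : Int := cs.2.2.length
  ((if l1 ≥ l2 ∧ l1 ≥ l3 then [1] else []) ++
   (if l2 ≥ l1 ∧ l2 ≥ l3 then [2] else []) ++
   (if l3 ≥ l1 ∧ l3 ≥ l2 then [3] else []) : List Int)

-- ===== PORT B =====
-- hist[(i % 40, a)] = hist.get((i % 40, a), 0) + 1, over enumerate(answers)
def pvHist (answers : List Int) : PySem.Dict (Int × Int) Int :=
  (PySem.List.enumerate answers).foldl
    (fun d p => d.modify (PySem.Int.mod p.1 40, p.2) 0 (· + 1)) PySem.Dict.empty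

-- sum(hist.get((r, pat[r % len(pat)]), 0) for r in range(40))
def pvScoreB (hist : PySem.Dict (Int × Int) Int) (pat : List Int) : Int :=
  (PySem.List.pyRange 0 40 1).foldl
    (fun acc r => acc + hist.getD (r, PySem.List.pyGetD pat (PySem.Int.mod r (PySem.List.len pat)) 0) 0) 0

def solution_alt (answers : List Int) : List Int :=
  let hist := pvHist answers
  -- for num, pat in …: running-max selection (best, m)
  (([(1, [1, 2, 3, 4, 5]),
     (2, [2, 1, 2, 3, 2, 4, 2, 5]),
     (3, [3, 3, 1, 1, 2, 2, 4, 4, 5, 5])] : List (Int × List Int)).foldl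
    (fun (st : List Int × Int) p =>
      let s := pvScoreB hist p.2
      if s > st.2 then ([p.1], s)
      else if s = st.2 then (st.1 ++ [p.1], st.2)
      else st) ([], -1)).1

-- ===== PRECONDITION & SPEC =====
-- Pre_ excludes inputs with more than 10000 answers: there Python A raises IndexError
-- (its precomputed answer lists have exactly 10000 entries).
def Pre_solution (answers : List Int) : Prop := answers.length ≤ 10000
instance (answers : List Int) : Decidable (Pre_solution answers) := by unfold Pre_solution; infer_instance
def pvWitness_solution : List Int := [1, 3, 2, 4, 2]

def Spec_solution (answers : List Int) (out : List Int) : Prop := out = solution_alt answers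
instance (answers : List Int) (out : List Int) : Decidable (Spec_solution answers out) := by unfold Spec_solution; infer_instance

-- ===== CLAIM (what is proved, stated in full; the proofs are below) =====
def Claim_equal_solution : Prop := ∀ (answers : List Int), Dom_solution answers → Pre_solution answers → Spec_solution answers (solution answers)

-- ===== LEMMAS AND PROOFS =====

-- periodic indexing into a flattened replicate
theorem getD_flatten_replicate (l : List Int) (k i : Nat) (h : i < k * l.length) :
    ((List.replicate k l).flatten).getD i 0 = l.getD (i % l.length) 0 := by
  induction k generalizing i with
  | zero => simp at h
  | succ k ih =>
    have hmul : (k + 1) * l.length = k * l.length + l.length := by ring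
    have hL : 0 < l.length := by
      rcases Nat.eq_zero_or_pos l.length with h0 | h0
      · rw [h0, Nat.mul_zero] at h; omega
      · exact h0
    rw [List.replicate_succ, List.flatten_cons]
    by_cases hi : i < l.length
    · rw [List.getD, List.getD, List.getElem?_append_left hi, Nat.mod_eq_of_lt hi]
    · have hle : l.length ≤ i := by omega
      rw [List.getD, List.getElem?_append_right hle]
      have := ih (i - l.length) (by omega)
      rw [List.getD] at this
      rw [this, Nat.mod_eq_sub_mod hle]

-- the common count both programs compute: matches of xs against pat repeated, starting at offset s
def pvCnt (pat : List Int) : Nat → List Int → Nat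
  | _, [] => 0
  | s, x :: xs => (if x = pat.getD (s % pat.length) 0 then 1 else 0) + pvCnt pat (s + 1) xs

theorem pvCnt_eq_countP (pat : List Int) (xs : List Int) : ∀ s : Nat,
    pvCnt pat s xs = (List.range xs.length).countP
      (fun i => xs.getD i 0 = pat.getD ((s + i) % pat.length) 0) := by
  induction xs with
  | nil => intro s; simp [pvCnt]
  | cons x xs ih =>
    intro s
    simp only [pvCnt, List.length_cons, List.range_succ_eq_map, List.countP_cons,
      List.countP_map, List.getD_cons_zero, Nat.add_zero]
    rw [ih (s + 1)]
    have hsh : (fun i => decide (xs.getD i 0 = pat.getD ((s + 1 + i) % pat.length) 0))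
        = ((fun i => decide ((x :: xs).getD i 0 = pat.getD ((s + i) % pat.length) 0)) ∘ Nat.succ) := by
      funext i
      simp only [Function.comp, List.getD_cons_succ]
      have : s + 1 + i = s + (i + 1) := by omega
      rw [this]
    rw [hsh]
    simp only [decide_eq_true_eq]
    omega

-- A's triple fold splits into three independent folds
theorem triple_fold_split (l : List Int) (f1 f2 f3 : Int → Prop)
    [DecidablePred f1] [DecidablePred f2] [DecidablePred f3] (g1 g2 g3 : Int → Int)
    (c : List Int × List Int × List Int) :
    (l.foldl (fun (c : List Int × List Int × List Int) i =>
        (if f1 i then c.1 ++ [g1 i] else c.1,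
         if f2 i then c.2.1 ++ [g2 i] else c.2.1,
         if f3 i then c.2.2 ++ [g3 i] else c.2.2)) c) =
    (l.foldl (fun c1 i => if f1 i then c1 ++ [g1 i] else c1) c.1,
     l.foldl (fun c2 i => if f2 i then c2 ++ [g2 i] else c2) c.2.1,
     l.foldl (fun c3 i => if f3 i then c3 ++ [g3 i] else c3) c.2.2) := by
  induction l generalizing c with
  | nil => rfl
  | cons x xs ih => simp only [List.foldl_cons, ih]

-- length of one of A's conditional-append folds = the common count
theorem aCount (answers : List Int) (hn : answers.length ≤ 10000)
    (ansA pat : List Int) (hper : ∀ i : Nat, i < 10000 → ansA.getD i 0 = pat.getD (i % pat.length) 0) :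
    (((PySem.List.pyRange 0 (PySem.List.len answers) 1).foldl
        (fun c1 i => if PySem.List.pyGetD answers i 0 = PySem.List.pyGetD ansA i 0
                     then c1 ++ [PySem.List.pyGetD ansA i 0] else c1) ([] : List Int)).length)
      = pvCnt pat 0 answers := by
  rw [PySem.List.len_eq, PySem.List.pyRange_zero_natCast, List.foldl_map]
  have hfold : (List.range answers.length).foldl
      (fun c1 (k : Nat) => if PySem.List.pyGetD answers (k : Int) 0 = PySem.List.pyGetD ansA (k : Int) 0
                     then c1 ++ [PySem.List.pyGetD ansA (k : Int) 0] else c1) ([] : List Int)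
      = [] ++ ((List.range answers.length).filter
          (fun k => answers.getD k 0 = ansA.getD k 0)).map (fun k => ansA.getD k 0) := by
    rw [← PySem.List.foldl_append_if (fun k => decide (answers.getD k 0 = ansA.getD k 0))
        (fun k => ansA.getD k 0)]
    simp [PySem.List.pyGetD_natCast]
  rw [hfold]
  simp only [List.nil_append, List.length_map, ← List.countP_eq_length_filter]
  rw [pvCnt_eq_countP pat answers 0]
  apply List.countP_congr
  intro i hi
  rw [List.mem_range] at hi
  rw [hper i (by omega)]
  simp


-- ===== B-side lemmas =====

-- the histogram lookup is a count over the residue-keyed pairs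
theorem histD_gen (l : List (Int × Int)) (d : PySem.Dict (Int × Int) Int) (k : Int × Int) :
    (l.foldl (fun d p => d.modify (PySem.Int.mod p.1 40, p.2) 0 (· + 1)) d).getD k 0
      = d.getD k 0 + ((l.map (fun p => (PySem.Int.mod p.1 40, p.2))).count k : Int) := by
  induction l generalizing d with
  | nil => simp
  | cons q l ih =>
    simp only [List.foldl_cons, List.map_cons, List.count_cons]
    rw [ih]
    rw [PySem.Dict.getD_modify]
    by_cases hk : k = (PySem.Int.mod q.1 40, q.2)
    · rw [if_pos hk, if_pos (by simp [hk])]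
      rw [hk]
      push_cast
      ring
    · rw [if_neg hk, if_neg (by simp only [beq_iff_eq]; exact fun he => hk he.symm)]
      push_cast
      ring

theorem histD (answers : List Int) (k : Int × Int) :
    (pvHist answers).getD k 0
      = (((PySem.List.enumerate answers).map
          (fun p => (PySem.Int.mod p.1 40, p.2))).count k : Int) := by
  unfold pvHist
  rw [histD_gen]
  simp

-- sum over a nodup list of an indicator that fires on exactly one key
theorem ind_sum (g : Int → Int) (R : List Int) (hR : R.Nodup) (x : Int × Int) (hx : x.1 ∈ R) :
    (R.map (fun r => if ((r, g r) : Int × Int) = x then (1 : Int) else 0)).sum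
      = if x.2 = g x.1 then 1 else 0 := by
  induction R with
  | nil => simp at hx
  | cons r R ih =>
    simp only [List.map_cons, List.sum_cons]
    rcases List.nodup_cons.mp hR with ⟨hrR, hR'⟩
    rcases List.mem_cons.mp hx with hx1 | hx1
    · have hrest : (R.map (fun r => if ((r, g r) : Int × Int) = x then (1 : Int) else 0)).sum = 0 := by
        apply List.sum_eq_zero
        intro y hy
        rcases List.mem_map.mp hy with ⟨r', hr', hval⟩
        have hne : ((r', g r') : Int × Int) ≠ x := by
          intro he
          have hr'x : r' = x.1 := by rw [← he]
          rw [hr'x, hx1] at hr'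
          exact hrR hr'
        rw [if_neg hne] at hval
        omega
      rw [hrest]
      have hiff : (((r, g r) : Int × Int) = x) ↔ (x.2 = g x.1) := by
        constructor
        · intro he; rw [← he]
        · intro he
          have hxp : x = (x.1, x.2) := rfl
          rw [hxp, ← hx1, he, hx1]
      split_ifs with h1 h2 h2
      · omega
      · exact absurd (hiff.mp h1) h2
      · exact absurd (hiff.mpr h2) h1
      · omega
    · have hne : ((r, g r) : Int × Int) ≠ x := by
        intro he
        have hrx : r = x.1 := by rw [← he]
        rw [hrx] at hrR
        exact hrR hx1
      rw [if_neg hne, ih hR' hx1]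
      omega

-- summing per-residue counts over a nodup residue list = one countP over the keyed pairs
theorem sum_count (g : Int → Int) (R : List Int) (hR : R.Nodup) (K : List (Int × Int))
    (hK : ∀ p ∈ K, p.1 ∈ R) :
    (R.map (fun r => (K.count ((r, g r) : Int × Int) : Int))).sum
      = (K.countP (fun p => p.2 = g p.1) : Int) := by
  induction K with
  | nil => simp
  | cons x K ih =>
    have hx := hK x List.mem_cons_self
    have hK' : ∀ p ∈ K, p.1 ∈ R := fun p hp => hK p (List.mem_cons_of_mem _ hp)
    have hsplit : (fun r => (((x :: K).count ((r, g r) : Int × Int)) : Int))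
        = fun r => ((K.count ((r, g r) : Int × Int)) : Int)
            + (if ((r, g r) : Int × Int) = x then (1 : Int) else 0) := by
      funext r
      by_cases h : ((r, g r) : Int × Int) = x
      · simp [h]
      · simp [h, (show ¬ x = ((r, g r) : Int × Int) from fun he => h he.symm)]
    rw [hsplit, PySem.List.sum_map_add_int, ih hK', ind_sum g R hR x hx, List.countP_cons]
    by_cases hx2 : x.2 = g x.1 <;> simp [hx2]

-- the keyed countP is the common count (40 is a multiple of the pattern period)
theorem keyCnt (pat : List Int) (hdvd : pat.length ∣ 40) (xs : List Int) : ∀ s : Nat,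
    ((PySem.List.enumerate xs (s : Int)).map
        (fun p => (PySem.Int.mod p.1 40, p.2))).countP
      (fun p => p.2 = PySem.List.pyGetD pat (PySem.Int.mod p.1 (PySem.List.len pat)) 0)
    = pvCnt pat s xs := by
  induction xs with
  | nil => intro s; simp [PySem.List.enumerate_nil, pvCnt]
  | cons x xs ih =>
    intro s
    rw [PySem.List.enumerate_cons]
    have hc : (s : Int) + 1 = ((s + 1 : Nat) : Int) := by push_cast; ring
    simp only [List.map_cons, List.countP_cons, hc, ih (s + 1)]
    have hidx : PySem.List.pyGetD pat
        (PySem.Int.mod (PySem.Int.mod ((s : Nat) : Int) 40) (PySem.List.len pat)) 0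
        = pat.getD (s % pat.length) 0 := by
      rw [PySem.List.len_eq, show (40 : Int) = ((40 : Nat) : Int) from by norm_num]
      rw [PySem.Int.mod_natCast, PySem.Int.mod_natCast,
        PySem.List.pyGetD_natCast, Nat.mod_mod_of_dvd s hdvd]
    simp only [hidx, pvCnt]
    by_cases hx : x = pat.getD (s % pat.length) 0 <;> simp [hx] <;> omega

-- B's score is the common count
theorem bScore (pat : List Int) (hdvd : pat.length ∣ 40) (answers : List Int) :
    pvScoreB (pvHist answers) pat = (pvCnt pat 0 answers : Int) := by
  unfold pvScoreB
  rw [PySem.List.foldl_add]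
  simp only [histD]
  have hmem : ∀ p ∈ (PySem.List.enumerate answers).map
      (fun p => (PySem.Int.mod p.1 40, p.2)), p.1 ∈ PySem.List.pyRange 0 40 1 := by
    intro p hp
    rcases List.mem_map.mp hp with ⟨q, hq, rfl⟩
    rw [PySem.List.mem_pyRange_one]
    exact ⟨PySem.Int.mod_nonneg _ (by norm_num), PySem.Int.mod_lt _ (by norm_num)⟩
  rw [sum_count (fun r => PySem.List.pyGetD pat (PySem.Int.mod r (PySem.List.len pat)) 0)
      (PySem.List.pyRange 0 40 1) (PySem.List.nodup_pyRange_one 0 40) _ hmem]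
  have h := keyCnt pat hdvd answers 0
  simp only [Nat.cast_zero] at h
  rw [h]
  simp

-- the selection step: B's running-max loop over the three scores equals A's pairwise ≥ cascade
theorem select3 (a b c : Int) (ha : 0 ≤ a) :
    ((if a ≥ b ∧ a ≥ c then ([1] : List Int) else []) ++
     (if b ≥ a ∧ b ≥ c then [2] else []) ++
     (if c ≥ a ∧ c ≥ b then [3] else []))
    = (([(1, a), (2, b), (3, c)] : List (Int × Int)).foldl
      (fun (st : List Int × Int) p =>
        let s := p.2
        if s > st.2 then ([p.1], s)
        else if s = st.2 then (st.1 ++ [p.1], st.2)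
        else st) ([], -1)).1 := by
  simp only [List.foldl_cons, List.foldl_nil]
  rw [if_pos (show a > (-1 : Int) by omega)]
  rcases lt_trichotomy a b with hab | hab | hab
  · rw [if_pos (show b > a by omega)]
    rcases lt_trichotomy b c with hbc | hbc | hbc
    · rw [if_pos (show c > b by omega)]
      split_ifs <;> first | rfl | omega
    · rw [if_neg (show ¬ c > b by omega), if_pos (show c = b by omega)]
      split_ifs <;> first | rfl | omega
    · rw [if_neg (show ¬ c > b by omega), if_neg (show ¬ c = b by omega)]
      split_ifs <;> first | rfl | omega
  · rw [if_neg (show ¬ b > a by omega), if_pos (show b = a by omega)]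
    rcases lt_trichotomy a c with hac | hac | hac
    · rw [if_pos (show c > a by omega)]
      split_ifs <;> first | rfl | omega
    · rw [if_neg (show ¬ c > a by omega), if_pos (show c = a by omega)]
      split_ifs <;> first | rfl | omega
    · rw [if_neg (show ¬ c > a by omega), if_neg (show ¬ c = a by omega)]
      split_ifs <;> first | rfl | omega
  · rw [if_neg (show ¬ b > a by omega), if_neg (show ¬ b = a by omega)]
    rcases lt_trichotomy a c with hac | hac | hac
    · rw [if_pos (show c > a by omega)]
      split_ifs <;> first | rfl | omega
    · rw [if_neg (show ¬ c > a by omega), if_pos (show c = a by omega)]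
      split_ifs <;> first | rfl | omega
    · rw [if_neg (show ¬ c > a by omega), if_neg (show ¬ c = a by omega)]
      split_ifs <;> first | rfl | omega

-- ===== VERDICT (by name: the statement is the Claim_ definition above) =====
set_option maxRecDepth 8192 in
theorem solution_spec : Claim_equal_solution := by
  intro answers _ hpre
  unfold Spec_solution
  simp only [solution, solution_alt]
  rw [triple_fold_split]
  have hper1 : ∀ i : Nat, i < 10000 → pvAns1.getD i 0 = ([1,2,3,4,5] : List Int).getD (i % 5) 0 := by
    intro i hi
    exact getD_flatten_replicate [1,2,3,4,5] 2000 i (by simpa using hi)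
  have hper2 : ∀ i : Nat, i < 10000 → pvAns2.getD i 0 = ([2,1,2,3,2,4,2,5] : List Int).getD (i % 8) 0 := by
    intro i hi
    exact getD_flatten_replicate [2,1,2,3,2,4,2,5] 1250 i (by simpa using hi)
  have hper3 : ∀ i : Nat, i < 10000 → pvAns3.getD i 0 = ([3,3,1,1,2,2,4,4,5,5] : List Int).getD (i % 10) 0 := by
    intro i hi
    exact getD_flatten_replicate [3,3,1,1,2,2,4,4,5,5] 1000 i (by simpa using hi)
  rw [aCount answers hpre pvAns1 [1,2,3,4,5] hper1,
      aCount answers hpre pvAns2 [2,1,2,3,2,4,2,5] hper2,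
      aCount answers hpre pvAns3 [3,3,1,1,2,2,4,4,5,5] hper3]
  rw [← bScore [1,2,3,4,5] (by decide) answers,
      ← bScore [2,1,2,3,2,4,2,5] (by decide) answers,
      ← bScore [3,3,1,1,2,2,4,4,5,5] (by decide) answers]
  rw [select3 _ _ _ (by rw [bScore [1,2,3,4,5] (by decide) answers]; positivity)]
  rfl
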